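-- pv_equiv track=rewrite | github.com/turanbrkay/Notion2Ical | generate_ics.py | find_date_prop_obj
-- ===== SOURCE A (Python) =====
-- from typing import Dict, Any, Optional, Tuple
--
-- def find_date_prop_obj(props: Dict[str, Any]) -> Dict[str, Any]:
--     for key in ("Unified Date", "Next Repetition", "Repetition Date"):
--         if key in props and props[key].get("type") == "date":
--             return props[key]
--     for _, obj in props.items():
--         if obj.get("type") == "date":
--             return obj
--     return {}
-- ===== SOURCE B (Python) =====
-- def find_date_prop_obj(props):
--     PRIORITY = {"Unified Date": 0, "Next Repetition": 1, "Repetition Date": 2}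
--     best_rank = 4
--     best = {}
--     for key, obj in props.items():
--         if obj.get("type") == "date":
--             rank = PRIORITY.get(key, 3)
--             if rank < best_rank:
--                 best_rank = rank
--                 best = obj
--     return best
-- ===== Notes on version B (the rewrite author's own statement) =====
-- stated objective: alternative
-- what changed: Replaces A's two sequential loops (probe the three priority keys, then rescan all items) by a single pass over props.items() keeping a best-ranked date property in an accumulator (rank 0-2 for the priority keys, 3 otherwise; strict improvement keeps the first among equal ranks).
import Mathlib
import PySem

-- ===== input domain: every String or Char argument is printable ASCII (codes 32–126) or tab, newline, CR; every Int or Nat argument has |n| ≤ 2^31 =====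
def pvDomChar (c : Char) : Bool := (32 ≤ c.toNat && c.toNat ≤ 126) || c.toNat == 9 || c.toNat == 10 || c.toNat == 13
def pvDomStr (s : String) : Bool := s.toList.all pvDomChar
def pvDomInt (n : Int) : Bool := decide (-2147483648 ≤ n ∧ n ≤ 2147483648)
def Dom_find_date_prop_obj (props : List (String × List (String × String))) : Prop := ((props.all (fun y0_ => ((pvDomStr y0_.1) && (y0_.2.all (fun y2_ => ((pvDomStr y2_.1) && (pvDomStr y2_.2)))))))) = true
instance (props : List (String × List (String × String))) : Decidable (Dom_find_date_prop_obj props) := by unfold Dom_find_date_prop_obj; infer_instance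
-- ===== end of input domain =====

-- B replaces A's two sequential loops (probe three priority keys, then rescan all items) by ONE pass
-- over the items keeping a best-ranked date property in an accumulator; objective: alternative, same cost.

-- The Python parameter is a dict; both ports first build it from the association list
-- (PySem.Dict.ofList = Python dict construction: later duplicate keys overwrite in place).
def pvToDict (props : List (String × List (String × String))) :
    PySem.Dict String (PySem.Dict String String) :=
  PySem.Dict.ofList (props.map (fun p => (p.1, PySem.Dict.ofList p.2)))

-- obj.get("type") == "date"
def pvIsDate (obj : PySem.Dict String String) : Bool :=
  obj.get? "type" == some "date"

-- ===== PORT A =====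
-- A's second loop: for _, obj in props.items(): if obj.get("type") == "date": return obj
def fdpA_loop2 : List (String × PySem.Dict String String) → List (String × String)
  | [] => []
  | (_, obj) :: rest => if pvIsDate obj then obj.items else fdpA_loop2 rest

-- A's first loop over the three priority keys ('key in props and props[key].get(...)'),
-- falling through to the second loop.
def fdpA_loop1 (d : PySem.Dict String (PySem.Dict String String)) :
    List String → List (String × String)
  | [] => fdpA_loop2 d.items
  | k :: ks =>
    match d.get? k with
    | some obj => if pvIsDate obj then obj.items else fdpA_loop1 d ks
    | none => fdpA_loop1 d ks

def find_date_prop_obj (props : List (String × List (String × String))) : List (String × String) :=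
  fdpA_loop1 (pvToDict props) ["Unified Date", "Next Repetition", "Repetition Date"]

-- ===== PORT B =====
-- PRIORITY.get(key, 3)
def pvRank (k : String) : Nat :=
  (PySem.Dict.ofList [("Unified Date", 0), ("Next Repetition", 1), ("Repetition Date", 2)]).getD k 3

-- the loop body: if obj.get("type") == "date": rank = PRIORITY.get(key,3); if rank < best_rank: update
def fdpB_step (acc : Nat × PySem.Dict String String) (p : String × PySem.Dict String String) :
    Nat × PySem.Dict String String :=
  if pvIsDate p.2 then
    (if pvRank p.1 < acc.1 then (pvRank p.1, p.2) else acc)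
  else acc

def find_date_prop_obj_alt (props : List (String × List (String × String))) : List (String × String) :=
  let d := pvToDict props
  let best := d.items.foldl fdpB_step (4, PySem.Dict.ofList [])
  best.2.items

-- ===== PRECONDITION & SPEC =====
def Spec_find_date_prop_obj (props : List (String × List (String × String))) (out : List (String × String)) : Prop := out = find_date_prop_obj_alt props
instance (props : List (String × List (String × String))) (out : List (String × String)) : Decidable (Spec_find_date_prop_obj props out) := by unfold Spec_find_date_prop_obj; infer_instance

-- ===== CLAIM =====
def Claim_equal_find_date_prop_obj : Prop := ∀ (props : List (String × List (String × String))), Dom_find_date_prop_obj props → Spec_find_date_prop_obj props (find_date_prop_obj props)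

-- ===== LEMMAS AND PROOFS =====

theorem pvRank_eq (k : String) :
    pvRank k = if k = "Unified Date" then 0 else if k = "Next Repetition" then 1
      else if k = "Repetition Date" then 2 else 3 := by
  unfold pvRank
  rw [show (PySem.Dict.ofList [("Unified Date", (0:Nat)), ("Next Repetition", 1), ("Repetition Date", 2)])
      = PySem.Dict.mk [("Unified Date", 0), ("Next Repetition", 1), ("Repetition Date", 2)] from by decide]
  simp only [PySem.Dict.getD_eq_get?_getD, PySem.Dict.get?_mk_cons]
  by_cases h0 : k = "Unified Date"
  · simp [h0]
  · by_cases h1 : k = "Next Repetition"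
    · simp [h1]
    · by_cases h2 : k = "Repetition Date"
      · simp [h2]
      · simp [h0, h1, h2, Ne.symm h0, Ne.symm h1, Ne.symm h2, PySem.Dict.get?]

theorem pvRank_le (k : String) : pvRank k ≤ 3 := by
  rw [pvRank_eq]; split_ifs <;> omega

theorem pvRank_lt_three (k : String) (h : pvRank k < 3) :
    (pvRank k = 0 ∧ k = "Unified Date") ∨ (pvRank k = 1 ∧ k = "Next Repetition") ∨
      (pvRank k = 2 ∧ k = "Repetition Date") := by
  rw [pvRank_eq] at *
  split_ifs at * with h0 h1 h2 <;> simp_all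

-- If no item of l can improve the accumulator's rank, the fold is the identity.
theorem fold_stuck (l : List (String × PySem.Dict String String)) (br : Nat)
    (b : PySem.Dict String String)
    (h : ∀ p ∈ l, pvIsDate p.2 = true → ¬ pvRank p.1 < br) :
    l.foldl fdpB_step (br, b) = (br, b) := by
  induction l with
  | nil => rfl
  | cons q rest ih =>
    have hq := h q (by simp)
    have hstep : fdpB_step (br, b) q = (br, b) := by
      unfold fdpB_step
      by_cases hd : pvIsDate q.2 = true
      · simp [hd, hq hd]
      · simp [hd]
    rw [List.foldl_cons, hstep]
    exact ih (fun p hp => h p (by simp [hp]))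

-- If l contains a date item (k, obj) of priority rank r ≤ 2 beating the accumulator, keys are
-- distinct, and no date item of l has a strictly smaller rank, the fold ends at (r, obj).
theorem fold_finds (l : List (String × PySem.Dict String String)) (k : String)
    (obj : PySem.Dict String String) (r : Nat) (hr2 : r ≤ 2)
    (hrk : pvRank k = r) (hmem : (k, obj) ∈ l) (hdate : pvIsDate obj = true)
    (hnd : (l.map (·.1)).Nodup)
    (hmin : ∀ p ∈ l, pvIsDate p.2 = true → r ≤ pvRank p.1) :
    ∀ br b, r < br → l.foldl fdpB_step (br, b) = (r, obj) := by
  induction l with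
  | nil => cases hmem
  | cons q rest ih =>
    intro br b hbr
    by_cases hk : q.1 = k
    · have hq : q = (k, obj) := by
        rcases List.mem_cons.mp hmem with h | h
        · exact h.symm
        · exfalso
          have : k ∈ rest.map (·.1) := List.mem_map.mpr ⟨(k, obj), h, rfl⟩
          simp only [List.map_cons, List.nodup_cons, hk] at hnd
          exact hnd.1 this
      subst hq
      have hstep : fdpB_step (br, b) (k, obj) = (r, obj) := by
        unfold fdpB_step; simp [hdate, hrk, hbr]
      rw [List.foldl_cons, hstep]
      exact fold_stuck rest r obj (fun p hp hd =>
        not_lt.mpr (hmin p (by simp [hp]) hd))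
    · have hmem' : (k, obj) ∈ rest := by
        rcases List.mem_cons.mp hmem with h | h
        · exact absurd (congrArg Prod.fst h.symm) hk
        · exact h
      have hnd' : (rest.map (·.1)).Nodup := by
        simp only [List.map_cons, List.nodup_cons] at hnd; exact hnd.2
      have hmin' : ∀ p ∈ rest, pvIsDate p.2 = true → r ≤ pvRank p.1 :=
        fun p hp => hmin p (by simp [hp])
      -- the head cannot reach rank ≤ r: rank q.1 = r ≤ 2 would force q.1 = k
      have hqr : pvIsDate q.2 = true → r < pvRank q.1 := by
        intro hd
        rcases lt_or_eq_of_le (hmin q (by simp) hd) with h | h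
        · exact h
        · exfalso
          have hlt : pvRank q.1 < 3 := by omega
          rcases pvRank_lt_three q.1 hlt with ⟨he, hs⟩ | ⟨he, hs⟩ | ⟨he, hs⟩ <;>
          · rcases pvRank_lt_three k (by omega) with ⟨he', hs'⟩ | ⟨he', hs'⟩ | ⟨he', hs'⟩ <;>
              first
              | (exact hk (hs.trans hs'.symm))
              | omega
      have hstep : ∃ br', fdpB_step (br, b) q = (br', (fdpB_step (br, b) q).2) ∧ r < br' := by
        unfold fdpB_step
        by_cases hd : pvIsDate q.2 = true
        · by_cases himp : pvRank q.1 < br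
          · exact ⟨pvRank q.1, by simp [hd, himp], hqr hd⟩
          · exact ⟨br, by simp [hd, himp], hbr⟩
        · exact ⟨br, by simp [hd], hbr⟩
      obtain ⟨br', heq, hbr'⟩ := hstep
      rw [List.foldl_cons, heq]
      exact ih hmem' hnd' hmin' _ _ hbr'

-- With no priority-ranked date item anywhere in l, the fold from (4, {}) computes A's second loop.
theorem fold_loop2 (l : List (String × PySem.Dict String String))
    (h : ∀ p ∈ l, pvIsDate p.2 = true → ¬ pvRank p.1 < 3) :
    (l.foldl fdpB_step (4, PySem.Dict.ofList [])).2.items = fdpA_loop2 l := by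
  induction l with
  | nil => rfl
  | cons q rest ih =>
    by_cases hd : pvIsDate q.2 = true
    · have h3 : pvRank q.1 = 3 :=
        le_antisymm (pvRank_le q.1) (not_lt.mp (h q (by simp) hd))
      have hstep : fdpB_step (4, PySem.Dict.ofList []) q = (pvRank q.1, q.2) := by
        unfold fdpB_step; simp [hd, h3]
      rw [List.foldl_cons, hstep,
        fold_stuck rest (pvRank q.1) q.2
          (fun p hp hdp => by rw [h3]; exact h p (by simp [hp]) hdp)]
      obtain ⟨k, obj⟩ := q
      simp [fdpA_loop2, hd]
    · have hstep : fdpB_step (4, PySem.Dict.ofList []) q = (4, PySem.Dict.ofList []) := by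
        unfold fdpB_step; simp [hd]
      rw [List.foldl_cons, hstep]
      obtain ⟨k, obj⟩ := q
      simp only [fdpA_loop2, hd, Bool.false_eq_true, if_false]
      exact ih (fun p hp => h p (by simp [hp]))

-- ranks of the three priority keys
theorem pvRank_UD : pvRank "Unified Date" = 0 := by rw [pvRank_eq]; simp
theorem pvRank_NR : pvRank "Next Repetition" = 1 := by rw [pvRank_eq]; simp
theorem pvRank_RD : pvRank "Repetition Date" = 2 := by rw [pvRank_eq]; simp

-- Main equivalence on any dict with Nodup keys.
theorem fdp_main (d : PySem.Dict String (PySem.Dict String String)) (hnd : d.keys.Nodup) :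
    fdpA_loop1 d ["Unified Date", "Next Repetition", "Repetition Date"] =
      (d.items.foldl fdpB_step (4, PySem.Dict.ofList [])).2.items := by
  have hnd' : (d.items.map (·.1)).Nodup := hnd
  -- per-key facts: whether the key carries a date property
  have key_date : ∀ (k : String),
      (∃ obj, d.get? k = some obj ∧ pvIsDate obj = true) ∨
      (∀ p ∈ d.items, p.1 = k → pvIsDate p.2 = false) := by
    intro k
    cases hg : d.get? k with
    | none =>
      refine Or.inr (fun p hp h1 => ?_)
      obtain ⟨pk, pv⟩ := p
      cases h1
      have := PySem.Dict.get?_of_mem_items d hp hnd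
      rw [hg] at this; cases this
    | some obj =>
      by_cases hd : pvIsDate obj = true
      · exact Or.inl ⟨obj, rfl, hd⟩
      · refine Or.inr (fun p hp h1 => ?_)
        obtain ⟨pk, pv⟩ := p
        cases h1
        have := PySem.Dict.get?_of_mem_items d hp hnd
        rw [hg] at this
        cases this
        simpa using hd
  -- turn "no priority key has a date" into a rank bound on date items
  have no_rank : ∀ (p : String × PySem.Dict String String), p ∈ d.items →
      pvIsDate p.2 = true →
      (∀ q ∈ d.items, q.1 = "Unified Date" → pvIsDate q.2 = false) →
      (∀ q ∈ d.items, q.1 = "Next Repetition" → pvIsDate q.2 = false) →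
      (∀ q ∈ d.items, q.1 = "Repetition Date" → pvIsDate q.2 = false) →
      ¬ pvRank p.1 < 3 := by
    intro p hp hdp h0 h1 h2 hlt
    rcases pvRank_lt_three p.1 hlt with ⟨_, hs⟩ | ⟨_, hs⟩ | ⟨_, hs⟩
    · rw [h0 p hp hs] at hdp; cases hdp
    · rw [h1 p hp hs] at hdp; cases hdp
    · rw [h2 p hp hs] at hdp; cases hdp
  rcases key_date "Unified Date" with ⟨obj, hg, hd⟩ | h0
  · -- rank-0 date item present: both return it
    have hmem := PySem.Dict.mem_items_of_get?_eq_some d hg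
    rw [fold_finds d.items "Unified Date" obj 0 (by omega) pvRank_UD hmem hd hnd'
      (fun p _ _ => Nat.zero_le _) 4 _ (by omega)]
    simp [fdpA_loop1, hg, hd]
  · have h0' : ∀ q ∈ d.items, q.1 = "Unified Date" → pvIsDate q.2 = false := h0
    have hA0 : fdpA_loop1 d ["Unified Date", "Next Repetition", "Repetition Date"] =
        fdpA_loop1 d ["Next Repetition", "Repetition Date"] := by
      simp only [fdpA_loop1]
      cases hg : d.get? "Unified Date" with
      | none => rfl
      | some obj =>
        have := h0' _ (PySem.Dict.mem_items_of_get?_eq_some d hg) rfl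
        simp [this]
    rw [hA0]
    have min1 : ∀ p ∈ d.items, pvIsDate p.2 = true → 1 ≤ pvRank p.1 := by
      intro p hp hdp
      by_contra hc
      rcases pvRank_lt_three p.1 (by omega) with ⟨_, hs⟩ | ⟨he, _⟩ | ⟨he, _⟩ <;>
        first
        | (rw [h0' p hp hs] at hdp; cases hdp)
        | omega
    rcases key_date "Next Repetition" with ⟨obj, hg, hd⟩ | h1
    · have hmem := PySem.Dict.mem_items_of_get?_eq_some d hg
      rw [fold_finds d.items "Next Repetition" obj 1 (by omega) pvRank_NR hmem hd hnd'
        min1 4 _ (by omega)]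
      simp [fdpA_loop1, hg, hd]
    · have h1' : ∀ q ∈ d.items, q.1 = "Next Repetition" → pvIsDate q.2 = false := h1
      have hA1 : fdpA_loop1 d ["Next Repetition", "Repetition Date"] =
          fdpA_loop1 d ["Repetition Date"] := by
        simp only [fdpA_loop1]
        cases hg : d.get? "Next Repetition" with
        | none => rfl
        | some obj =>
          have := h1' _ (PySem.Dict.mem_items_of_get?_eq_some d hg) rfl
          simp [this]
      rw [hA1]
      have min2 : ∀ p ∈ d.items, pvIsDate p.2 = true → 2 ≤ pvRank p.1 := by
        intro p hp hdp
        by_contra hc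
        rcases pvRank_lt_three p.1 (by omega) with ⟨_, hs⟩ | ⟨_, hs⟩ | ⟨he, _⟩ <;>
          first
          | (rw [h0' p hp hs] at hdp; cases hdp)
          | (rw [h1' p hp hs] at hdp; cases hdp)
          | omega
      rcases key_date "Repetition Date" with ⟨obj, hg, hd⟩ | h2
      · have hmem := PySem.Dict.mem_items_of_get?_eq_some d hg
        rw [fold_finds d.items "Repetition Date" obj 2 (by omega) pvRank_RD hmem hd hnd'
          min2 4 _ (by omega)]
        simp [fdpA_loop1, hg, hd]
      · have h2' : ∀ q ∈ d.items, q.1 = "Repetition Date" → pvIsDate q.2 = false := h2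
        have hA2 : fdpA_loop1 d ["Repetition Date"] = fdpA_loop2 d.items := by
          simp only [fdpA_loop1]
          cases hg : d.get? "Repetition Date" with
          | none => rfl
          | some obj =>
            have := h2' _ (PySem.Dict.mem_items_of_get?_eq_some d hg) rfl
            simp [this]
        rw [hA2]
        exact (fold_loop2 d.items
          (fun p hp hdp => no_rank p hp hdp h0' h1' h2')).symm

-- ===== VERDICT =====
theorem find_date_prop_obj_spec : Claim_equal_find_date_prop_obj := by
  intro props _
  show find_date_prop_obj props = find_date_prop_obj_alt props
  unfold find_date_prop_obj find_date_prop_obj_alt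
  exact fdp_main (pvToDict props) (PySem.Dict.nodup_keys_ofList _)
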